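-- pv_equiv track=rewrite | github.com/ChongKaKam/TAMA | Datasets/Classification_Dataset.py | find_anomaly_intervals
-- ===== SOURCE A (Python) =====
-- def find_anomaly_intervals(label):
--     intervals = []
--     start = None
--     for i, val in enumerate(label):
--         if val == 1 and start is None:
--             start = i
--         elif val == 0 and start is not None:
--             intervals.append([start, i - 1])
--             start = None
--     if start is not None:
--         intervals.append([start, len(label) - 1])
--     return intervals
-- ===== SOURCE B (Python) =====
-- def find_anomaly_intervals(label):
--     # pass 1: forward-fill an 'active' boolean list (1 turns it on, 0 off, others keep it)
--     flag = False
--     active = []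
--     for v in label:
--         if v == 1:
--             flag = True
--         elif v == 0:
--             flag = False
--         active.append(flag)
--     # pass 2: maximal runs of True
--     intervals = []
--     n = len(active)
--     i = 0
--     while i < n:
--         if active[i]:
--             j = i
--             while j + 1 < n and active[j + 1]:
--                 j += 1
--             intervals.append([i, j])
--             i = j + 1
--         else:
--             i += 1
--     return intervals
-- ===== Notes on version B (the rewrite author's own statement) =====
-- stated objective: alternative
-- what changed: Replaces A's single stateful scan (optional start index carried through one loop) by two passes: a forward-filled boolean 'active' list, then extraction of maximal runs of True with an inner extension loop.
import Mathlib
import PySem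

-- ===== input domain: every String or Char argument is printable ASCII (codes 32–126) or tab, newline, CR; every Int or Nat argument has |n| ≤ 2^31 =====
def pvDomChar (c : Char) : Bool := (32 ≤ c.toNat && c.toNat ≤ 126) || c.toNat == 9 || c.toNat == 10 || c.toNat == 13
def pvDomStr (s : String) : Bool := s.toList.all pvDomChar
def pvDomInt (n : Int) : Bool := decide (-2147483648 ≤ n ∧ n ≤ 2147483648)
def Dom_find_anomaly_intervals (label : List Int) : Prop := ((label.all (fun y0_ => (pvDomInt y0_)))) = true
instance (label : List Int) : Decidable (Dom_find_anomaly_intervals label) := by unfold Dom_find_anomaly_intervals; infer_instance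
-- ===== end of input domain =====

-- B changes the decomposition only (two passes: forward-filled boolean list, then maximal runs); same values, same O(n) cost.

-- ===== PORT A =====
-- one loop over enumerate(label) carrying (intervals, start); trailing open interval closed after the loop
def find_anomaly_intervals (label : List Int) : List (List Int) :=
  let st := (PySem.List.enumerate label).foldl
    (fun (s : List (List Int) × Option Int) (p : Int × Int) =>
      if p.2 = 1 ∧ s.2 = none then (s.1, some p.1)
      else if p.2 = 0 ∧ s.2 ≠ none then
        (s.1 ++ [[(match s.2 with | some v => v | none => 0), p.1 - 1]], none)
      else s)
    ([], none)
  match st.2 with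
  | none => st.1
  | some v => st.1 ++ [[v, (label.length : Int) - 1]]

-- ===== PORT B =====
-- pass 1 of Source B: forward-fill the 'active' flag along the list
def pvFill : List Int → Bool → List Bool
  | [], _ => []
  | v :: rest, flag =>
      let f := if v = 1 then true else if v = 0 then false else flag
      f :: pvFill rest f

-- inner while loop of Source B: how far the current run of True extends
def pvCtl : List Bool → Nat
  | [] => 0
  | b :: r => if b then pvCtl r + 1 else 0

-- outer while loop of Source B: emit [i, j] for each maximal run of True
def pvRuns : List Bool → Int → List (List Int)
  | [], _ => []
  | b :: rest, i =>
      if b then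
        [i, i + (pvCtl rest : Int)] :: pvRuns (rest.drop (pvCtl rest)) (i + (pvCtl rest : Int) + 1)
      else pvRuns rest (i + 1)
termination_by bs _ => bs.length
decreasing_by
  · simpa using Nat.lt_succ_of_le (Nat.sub_le _ _)
  · simp

def find_anomaly_intervals_alt (label : List Int) : List (List Int) :=
  pvRuns (pvFill label false) 0

-- ===== PRECONDITION & SPEC =====
def Spec_find_anomaly_intervals (label : List Int) (out : List (List Int)) : Prop := out = find_anomaly_intervals_alt label
instance (label : List Int) (out : List (List Int)) : Decidable (Spec_find_anomaly_intervals label out) := by unfold Spec_find_anomaly_intervals; infer_instance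

-- ===== CLAIM (what is proved, stated in full; the proofs are below) =====
def Claim_equal_find_anomaly_intervals : Prop := ∀ (label : List Int), Dom_find_anomaly_intervals label → Spec_find_anomaly_intervals label (find_anomaly_intervals label)

-- ===== LEMMAS AND PROOFS =====

-- proof-side spec: the run extraction written as a pair of state machines
mutual
def specRuns : List Bool → Int → List (List Int)
  | [], _ => []
  | b :: r, i => if b then specCont r (i + 1) i else specRuns r (i + 1)
def specCont : List Bool → Int → Int → List (List Int)
  | [], i, s => [[s, i - 1]]
  | b :: r, i, s => if b then specCont r (i + 1) s else [s, i - 1] :: specRuns r (i + 1)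
end

lemma specCont_eq (r : List Bool) : ∀ (j s : Int),
    specCont r j s = [s, j + (pvCtl r : Int) - 1] :: specRuns (r.drop (pvCtl r)) (j + (pvCtl r : Int)) := by
  induction r with
  | nil => intro j s; simp [specCont, specRuns, pvCtl]
  | cons b r ih =>
      intro j s
      by_cases hb : b = true
      · have := ih (j + 1) s
        simp [specCont, specRuns, pvCtl, hb, this]
        constructor
        · ring_nf
        · have : (j + 1 + (pvCtl r : Int)) = (j + ((pvCtl r : Int) + 1)) := by ring
          rw [this]
      · simp at hb
        simp [specCont, specRuns, pvCtl, hb]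

lemma pvRuns_eq_specRuns (bs : List Bool) (i : Int) : pvRuns bs i = specRuns bs i := by
  induction bs, i using pvRuns.induct with
  | case1 => simp [pvRuns, specRuns]
  | case2 rest i ih =>
      rw [pvRuns, specRuns]
      simp only [if_true]
      rw [ih, specCont_eq,
        show i + 1 + (pvCtl rest : Int) - 1 = i + (pvCtl rest : Int) by ring,
        show i + 1 + (pvCtl rest : Int) = i + (pvCtl rest : Int) + 1 by ring]
  | case3 b rest i hb ih =>
      rw [pvRuns, specRuns]
      simp only [hb]
      simp [ih]

-- direct recursive form of A's loop (index i, open-run state)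
def aRec : List Int → Int → Option Int → List (List Int)
  | [], i, st => match st with | none => [] | some s => [[s, i - 1]]
  | v :: r, i, st =>
      if v = 1 ∧ st = none then aRec r (i + 1) (some i)
      else if v = 0 ∧ st ≠ none then
        [(match st with | some s => s | none => 0), i - 1] :: aRec r (i + 1) none
      else aRec r (i + 1) st

-- A's foldl + final patch-up equals aRec
lemma foldA_eq_aRec (l : List Int) : ∀ (i : Int) (acc : List (List Int)) (st : Option Int),
    (let out := (PySem.List.enumerate l i).foldl
      (fun (s : List (List Int) × Option Int) (p : Int × Int) =>
        if p.2 = 1 ∧ s.2 = none then (s.1, some p.1)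
        else if p.2 = 0 ∧ s.2 ≠ none then
          (s.1 ++ [[(match s.2 with | some v => v | none => 0), p.1 - 1]], none)
        else s) (acc, st)
     match out.2 with
     | none => out.1
     | some v => out.1 ++ [[v, i + (l.length : Int) - 1]]) = acc ++ aRec l i st := by
  induction l with
  | nil =>
      intro i acc st
      cases st <;> simp [PySem.List.enumerate_nil, aRec]
  | cons v r ih =>
      intro i acc st
      rw [PySem.List.enumerate_cons]
      simp only [List.foldl_cons]
      by_cases h1 : v = 1 ∧ st = none
      · obtain ⟨hv, hst⟩ := h1
        have := ih (i + 1) acc (some i)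
        simp only [hv, hst, and_self, if_pos, if_true, Option.some.injEq] at *
        rw [aRec.eq_def]
        simp only [hv, hst, and_self, if_pos, if_true]
        simpa [add_assoc, add_comm, add_left_comm] using this
      · by_cases h0 : v = 0 ∧ st ≠ none
        · obtain ⟨s, hs⟩ := Option.ne_none_iff_exists'.mp h0.2
          have := ih (i + 1) (acc ++ [[s, i - 1]]) none
          simp only [if_neg h1, h0, and_self, if_pos, if_true, hs] at *
          rw [aRec.eq_def]
          simp only [if_neg h1, h0, and_self, if_pos, if_true, hs]
          simpa [add_assoc, add_comm, add_left_comm] using this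
        · have := ih (i + 1) acc st
          simp only [if_neg h1, if_neg h0] at *
          rw [aRec.eq_def]
          simp only [if_neg h1, if_neg h0]
          simpa [add_assoc, add_comm, add_left_comm] using this

-- the heart: A's state machine = runs over the forward-filled booleans
lemma aRec_eq_spec (l : List Int) : ∀ (i : Int),
    aRec l i none = specRuns (pvFill l false) i ∧
    ∀ s, aRec l i (some s) = specCont (pvFill l true) i s := by
  induction l with
  | nil => intro i; simp [aRec, pvFill, specRuns, specCont]
  | cons v r ih =>
      intro i
      constructor
      · by_cases h1 : v = 1
        · rw [aRec.eq_def]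
          simp only [h1, and_self, if_pos, if_true, pvFill, specRuns]
          simpa using (ih (i + 1)).2 i
        · by_cases h0 : v = 0
          · rw [aRec.eq_def]
            simp [h1, h0, pvFill, specRuns, (ih (i + 1)).1]
          · rw [aRec.eq_def]
            simp [h1, h0, pvFill, specRuns, (ih (i + 1)).1]
      · intro s
        by_cases h0 : v = 0
        · rw [aRec.eq_def]
          simp [h0, (by decide : (0:Int) ≠ 1), pvFill, specCont, (ih (i + 1)).1]
        · by_cases h1 : v = 1
          · rw [aRec.eq_def]
            simp only [h1, Option.some_ne_none, not_false_iff, and_true, if_true,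
              (by decide : (1:Int) = 0 ↔ False), false_and, if_false, pvFill, specCont]
            simpa using (ih (i + 1)).2 s
          · rw [aRec.eq_def]
            simp [h0, h1, pvFill, specCont, (ih (i + 1)).2 s]

-- ===== VERDICT (by name: the statement is the Claim_ definition above) =====
theorem find_anomaly_intervals_spec : Claim_equal_find_anomaly_intervals := by
  intro label _
  unfold Spec_find_anomaly_intervals find_anomaly_intervals find_anomaly_intervals_alt
  have hf := foldA_eq_aRec label 0 [] none
  simp only [zero_add] at hf
  rw [hf, pvRuns_eq_specRuns]
  simpa using (aRec_eq_spec label 0).1
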